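-- pv_equiv track=rewrite | github.com/boostcampaitech4lv23nlp2/final-project-level3-nlp-09 | src/embedspace.py | get_samples_per_class
-- ===== SOURCE A (Python) =====
-- from collections import defaultdict
--
-- def get_samples_per_class(text, num_samples_per_class):
--     food_dict = defaultdict(int)
--     text_idx_list = []
--
--     for idx in range(len(text)):
--         label = text[idx]
--         if food_dict[label] < num_samples_per_class:
--             food_dict[label] += 1
--             text_idx_list.append(idx)
--     return text_idx_list
-- ===== SOURCE B (Python) =====
-- from collections import defaultdict
--
-- def get_samples_per_class(text, num_samples_per_class):
--     groups = defaultdict(list)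
--     for idx, label in enumerate(text):
--         groups[label].append(idx)
--     n = max(0, num_samples_per_class)
--     picked = []
--     for indices in groups.values():
--         picked.extend(indices[:n])
--     return sorted(picked)
-- ===== Notes on version B (the rewrite author's own statement) =====
-- stated objective: alternative
-- what changed: Instead of counting per-label selections while scanning with a counter dict, B first groups all indices by label in one pass, then takes each group's first max(0,n) indices by slicing and re-sorts the flattened selection into original index order.
import Mathlib
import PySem

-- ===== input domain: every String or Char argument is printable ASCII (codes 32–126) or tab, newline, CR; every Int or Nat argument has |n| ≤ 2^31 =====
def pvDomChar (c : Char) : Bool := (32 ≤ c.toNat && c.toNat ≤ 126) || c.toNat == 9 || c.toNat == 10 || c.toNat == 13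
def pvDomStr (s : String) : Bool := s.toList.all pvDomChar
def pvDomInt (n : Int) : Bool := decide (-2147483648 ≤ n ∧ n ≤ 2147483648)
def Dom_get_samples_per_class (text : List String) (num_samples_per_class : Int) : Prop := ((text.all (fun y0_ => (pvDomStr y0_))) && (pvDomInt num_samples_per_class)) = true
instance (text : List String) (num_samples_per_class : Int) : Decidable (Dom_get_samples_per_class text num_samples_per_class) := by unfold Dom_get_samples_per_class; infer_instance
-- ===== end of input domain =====

-- B groups all indices by label in one pass, slices the first max(0, n) indices of each group,
-- and re-sorts the flattened selection into original index order; same value as A's counter scan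
-- (objective: alternative decomposition, similar cost).

-- ===== PORT A =====
-- range(len(text)) indices are always in bounds, so text[idx] is ported as pyGetD with an unused
-- default; the defaultdict(int) read food_dict[label] is ported as getD _ _ 0 (the key insertion
-- done by defaultdict.__getitem__ is unobservable here: the dict is only ever read back via getD).
def get_samples_per_class (text : List String) (num_samples_per_class : Int) : List Int :=
  ((PySem.List.pyRange 0 (text.length : Int)).foldl
    (fun (st : PySem.Dict String Int × List Int) idx =>
      let label := PySem.List.pyGetD text idx ""
      if PySem.Dict.getD st.1 label 0 < num_samples_per_class then
        (st.1.insert label (PySem.Dict.getD st.1 label 0 + 1), st.2 ++ [idx])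
      else st)
    (⟨[]⟩, [])).2

-- ===== PORT B =====
def get_samples_per_class_alt (text : List String) (num_samples_per_class : Int) : List Int :=
  let groups := (PySem.List.enumerate text 0).foldl
    (fun (g : PySem.Dict String (List Int)) p => g.modify p.2 [] (fun l => l ++ [p.1]))
    ⟨[]⟩
  let n := max 0 num_samples_per_class
  let picked := groups.values.foldl
    (fun (acc : List Int) indices => acc ++ PySem.List.slice indices none (some n)) []
  PySem.List.sorted picked (fun x => x)

-- ===== PRECONDITION & SPEC =====
def Spec_get_samples_per_class (text : List String) (num_samples_per_class : Int) (out : List Int) : Prop := out = get_samples_per_class_alt text num_samples_per_class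
instance (text : List String) (num_samples_per_class : Int) (out : List Int) : Decidable (Spec_get_samples_per_class text num_samples_per_class out) := by unfold Spec_get_samples_per_class; infer_instance

-- ===== CLAIM (what is proved, stated in full; the proofs are below) =====
def Claim_equal_get_samples_per_class : Prop := ∀ (text : List String) (num_samples_per_class : Int), Dom_get_samples_per_class text num_samples_per_class → Spec_get_samples_per_class text num_samples_per_class (get_samples_per_class text num_samples_per_class)

-- ===== LEMMAS AND PROOFS =====

-- ascending indices of the positions of label l in text
def pvOcc (text : List String) (l : String) : List Int :=
  (List.range text.length).filterMap
    (fun i => if text.getD i "" = l then some (i : Int) else none)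

-- the indices A selects: i such that fewer than n earlier positions carry the same label
def pvSel (text : List String) (n : Int) : List Int :=
  (List.range text.length).filterMap
    (fun i => if ((text.take i).count (text.getD i "") : Int) < n then some (i : Int) else none)

-- A's loop body, named for the invariant lemma (definitionally the body of the port)
def pvStepA (text : List String) (n : Int)
    (st : PySem.Dict String Int × List Int) (idx : Int) : PySem.Dict String Int × List Int :=
  let label := PySem.List.pyGetD text idx ""
  if PySem.Dict.getD st.1 label 0 < n then
    (st.1.insert label (PySem.Dict.getD st.1 label 0 + 1), st.2 ++ [idx])
  else st

-- B's grouping body, named for the invariant lemma (definitionally the body of the port)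
def pvStepG (g : PySem.Dict String (List Int)) (p : Int × String) : PySem.Dict String (List Int) :=
  g.modify p.2 [] (fun l => l ++ [p.1])

lemma pvGetD_append_left {xs ys : List String} {i : Int} (d : String)
    (h0 : 0 ≤ i) (h1 : i < (xs.length : Int)) :
    PySem.List.pyGetD (xs ++ ys) i d = PySem.List.pyGetD xs i d := by
  lift i to Nat using h0
  rw [PySem.List.pyGetD_natCast, PySem.List.pyGetD_natCast]
  have : i < xs.length := by exact_mod_cast h1
  simp [List.getD, List.getElem?_append_left this]

lemma pvTake_snoc {α : Type} (g : List α) (h : α) (m : Nat) :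
    (g ++ [h]).take m = g.take m ++ (if g.length < m then [h] else []) := by
  rcases le_or_gt m g.length with hle | hgt
  · rw [List.take_append_of_le_length hle]
    simp [Nat.not_lt.mpr hle]
  · rw [List.take_of_length_le (by simp; omega), List.take_of_length_le (le_of_lt hgt)]
    simp [hgt]

lemma pvOcc_snoc (text : List String) (x l : String) :
    pvOcc (text ++ [x]) l = pvOcc text l ++ (if x = l then [(text.length : Int)] else []) := by
  unfold pvOcc
  rw [List.length_append, List.length_singleton, List.range_succ, List.filterMap_append]
  congr 1
  · apply List.filterMap_congr
    intro i hi
    have : i < text.length := List.mem_range.mp hi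
    simp [List.getD, List.getElem?_append_left this]
  · simp [List.getD]
    split <;> simp_all

lemma pvOcc_length (text : List String) (l : String) :
    (pvOcc text l).length = text.count l := by
  induction text using List.reverseRecOn with
  | nil => simp [pvOcc]
  | append_singleton t x ih =>
    rw [pvOcc_snoc, List.length_append, ih, List.count_append]
    by_cases h : x = l <;> simp [h]

lemma pvOcc_eq_nil {text : List String} {l : String} (h : l ∉ text) : pvOcc text l = [] := by
  have := pvOcc_length text l
  rw [List.count_eq_zero_of_not_mem h] at this
  exact List.eq_nil_of_length_eq_zero this

lemma pvSel_snoc (text : List String) (x : String) (n : Int) :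
    pvSel (text ++ [x]) n
      = pvSel text n ++ (if (text.count x : Int) < n then [(text.length : Int)] else []) := by
  unfold pvSel
  rw [List.length_append, List.length_singleton, List.range_succ, List.filterMap_append]
  congr 1
  · apply List.filterMap_congr
    intro i hi
    have hlt : i < text.length := List.mem_range.mp hi
    rw [List.getD, List.getElem?_append_left hlt, List.take_append_of_le_length (le_of_lt hlt)]
    rfl
  · simp only [List.filterMap_cons, List.filterMap_nil, List.getD]
    rw [List.take_left]
    simp
    split <;> simp_all

lemma pvSel_lt_length (text : List String) (n : Int) :
    ∀ y ∈ pvSel text n, y < (text.length : Int) := by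
  intro y hy
  unfold pvSel at hy
  obtain ⟨i, hi, hsome⟩ := List.mem_filterMap.mp hy
  split at hsome
  · cases hsome; exact_mod_cast List.mem_range.mp hi
  · cases hsome

lemma pvSel_pairwise (text : List String) (n : Int) :
    (pvSel text n).Pairwise (· < ·) := by
  induction text using List.reverseRecOn with
  | nil => simp [pvSel]
  | append_singleton t x ih =>
    rw [pvSel_snoc]
    rw [List.pairwise_append]
    refine ⟨ih, by split <;> simp, ?_⟩
    intro a ha b hb
    split at hb
    · simp at hb; subst hb; exact pvSel_lt_length t n a ha
    · simp at hb

lemma pvFoldA_inv (n : Int) (text : List String) :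
    (∀ l : String,
        PySem.Dict.getD ((PySem.List.pyRange 0 (text.length : Int)).foldl (pvStepA text n) (⟨[]⟩, [])).1 l 0
          = min (text.count l : Int) (max n 0))
    ∧ ((PySem.List.pyRange 0 (text.length : Int)).foldl (pvStepA text n) (⟨[]⟩, [])).2 = pvSel text n := by
  induction text using List.reverseRecOn with
  | nil =>
    constructor
    · intro l
      simp [PySem.List.pyRange, PySem.Dict.getD, PySem.Dict.get?]
    · simp [PySem.List.pyRange, pvSel]
  | append_singleton t x ih =>
    have hlen : ((t ++ [x]).length : Int) = (t.length : Int) + 1 := by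
      push_cast [List.length_append, List.length_singleton]; omega
    rw [hlen, PySem.List.pyRange_one_succ_right (by positivity), List.foldl_append]
    have hcongr : (PySem.List.pyRange 0 (t.length : Int)).foldl (pvStepA (t ++ [x]) n) (⟨[]⟩, [])
        = (PySem.List.pyRange 0 (t.length : Int)).foldl (pvStepA t n) (⟨[]⟩, []) := by
      apply PySem.List.foldl_congr_mem
      intro acc idx hidx
      obtain ⟨h0, h1⟩ := PySem.List.mem_pyRange_one.mp hidx
      unfold pvStepA
      rw [pvGetD_append_left _ h0 h1]
    rw [hcongr]
    obtain ⟨ihd, iha⟩ := ih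
    have hx : PySem.List.pyGetD (t ++ [x]) (t.length : Int) "" = x := by
      rw [PySem.List.pyGetD_natCast]
      simp [List.getD]
    have hcount : ∀ l : String, (t ++ [x]).count l = t.count l + (if x = l then 1 else 0) := by
      intro l
      rw [List.count_append]
      by_cases h : x = l <;> simp [h]
    have hcnonneg : (0:Int) ≤ (t.count x : Int) := by positivity
    constructor
    · intro l
      simp only [List.foldl_cons, List.foldl_nil, pvStepA, hx]
      rw [ihd x]
      by_cases hc : min (t.count x : Int) (max n 0) < n
      · simp only [if_pos hc]
        by_cases hl : l = x
        · subst hl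
          simp only [PySem.Dict.getD, PySem.Dict.get?_insert_self, Option.getD_some]
          rw [hcount l, if_pos rfl]
          push_cast
          omega
        · simp only [PySem.Dict.getD, PySem.Dict.get?_insert_of_ne _ _ hl]
          rw [← PySem.Dict.getD, ihd l, hcount l, if_neg (fun h => hl h.symm)]
          simp
      · simp only [if_neg hc]
        rw [ihd l, hcount l]
        by_cases hl : x = l
        · subst hl; simp; omega
        · simp [hl]
    · simp only [List.foldl_cons, List.foldl_nil, pvStepA, hx]
      rw [ihd x, iha, pvSel_snoc]
      by_cases hc : min (t.count x : Int) (max n 0) < n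
      · rw [if_pos hc, if_pos (by omega)]
      · rw [if_neg hc, if_neg (by omega)]
        simp [iha]

lemma pvFind_self (ks : List String) (x : String) :
    ks.find? (· == x) = if x ∈ ks then some x else none := by
  induction ks with
  | nil => simp
  | cons k ks ih =>
    by_cases h : k = x
    · subst h; simp
    · rw [List.find?_cons_of_neg (by simpa using h), ih]
      have hxk : x ≠ k := fun hh => h hh.symm
      simp [hxk]

lemma pvFoldG_items (text : List String) :
    ∃ ks : List String,
      ((PySem.List.enumerate text 0).foldl pvStepG ⟨[]⟩).items = ks.map (fun l => (l, pvOcc text l))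
      ∧ ks.Nodup ∧ (∀ l, l ∈ ks ↔ l ∈ text) := by
  induction text using List.reverseRecOn with
  | nil =>
    exact ⟨[], by simp [PySem.List.enumerate], by simp, by simp⟩
  | append_singleton t x ih =>
    obtain ⟨ks, hitems, hnd, hmem⟩ := ih
    rw [PySem.List.enumerate_append, List.foldl_append]
    set G := (PySem.List.enumerate t 0).foldl pvStepG (⟨[]⟩ : PySem.Dict String (List Int)) with hG
    have hget : G.get? x = if x ∈ ks then some (pvOcc t x) else none := by
      rw [PySem.Dict.get?, hitems, List.find?_map]
      have : ((fun p => p.1 == x) ∘ fun l => (l, pvOcc t l)) = (· == x) := rfl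
      rw [this, pvFind_self]
      split <;> simp
    have hcont : G.contains x = decide (x ∈ ks) := by
      rw [PySem.Dict.contains, hitems, List.any_map]
      have : ((fun p => p.1 == x) ∘ fun l => (l, pvOcc t l)) = (· == x) := rfl
      rw [this]
      by_cases h : x ∈ ks
      · simp [h]
      · simp [h]
        intro a ha he
        exact h (he ▸ ha)
    simp only [PySem.List.enumerate, List.foldl_cons, List.foldl_nil, zero_add]
    unfold pvStepG PySem.Dict.modify
    by_cases hx : x ∈ ks
    · refine ⟨ks, ?_, hnd, ?_⟩
      · rw [PySem.Dict.insert, hcont, if_pos (by simp [hx])]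
        dsimp only
        rw [hitems, List.map_map]
        apply List.map_congr_left
        intro l _
        simp only [Function.comp_apply, beq_iff_eq]
        by_cases hl : l = x
        · subst hl
          simp [PySem.Dict.getD, hget, hx, pvOcc_snoc]
        · rw [if_neg hl, pvOcc_snoc, if_neg (fun h => hl h.symm), List.append_nil]
      · intro l
        rw [hmem]
        simp only [List.mem_append, List.mem_singleton]
        constructor
        · exact Or.inl
        · rintro (h | rfl)
          · exact h
          · exact (hmem l).mp hx
    · refine ⟨ks ++ [x], ?_, ?_, ?_⟩
      · rw [PySem.Dict.insert, hcont, if_neg (by simp [hx])]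
        dsimp only
        rw [hitems, List.map_append]
        congr 1
        · apply List.map_congr_left
          intro l hl
          rw [pvOcc_snoc, if_neg, List.append_nil]
          intro h
          exact hx (h ▸ hl)
        · simp [PySem.Dict.getD, hget, hx, pvOcc_snoc,
            pvOcc_eq_nil (fun h => hx ((hmem x).mpr h))]
      · simp only [List.nodup_append, List.nodup_singleton]
        refine ⟨hnd, trivial, ?_⟩
        intro a ha b hb
        simp only [List.mem_singleton] at hb
        subst hb
        intro he
        exact hx (he ▸ ha)
      · intro l
        simp [hmem]

lemma pvPerm_flatMap (n : Int) (text : List String) :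
    ∀ ks : List String, ks.Nodup → (∀ l, l ∈ ks ↔ l ∈ text) →
      (ks.flatMap (fun l => (pvOcc text l).take (max 0 n).toNat)).Perm (pvSel text n) := by
  induction text using List.reverseRecOn with
  | nil =>
    intro ks _ hmem
    have : ks = [] := List.eq_nil_iff_forall_not_mem.mpr (fun a ha => by simpa using (hmem a).mp ha)
    subst this
    simp [pvSel]
  | append_singleton t x ih =>
    intro ks hnd hmem
    set m := (max 0 n).toNat with hm
    set f := fun l => (pvOcc t l).take m with hf
    set f' := fun l => (pvOcc (t ++ [x]) l).take m with hf'
    have hxks : x ∈ ks := (hmem x).mpr (by simp)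
    obtain ⟨k1, k2, rfl⟩ := List.append_of_mem hxks
    have hxrest : x ∉ k1 ++ k2 := by
      have := hnd
      rw [List.nodup_append] at this
      obtain ⟨h1, h2, h3⟩ := this
      rw [List.mem_append]
      rintro (h | h)
      · exact h3 x h x (by simp) rfl
      · exact (List.nodup_cons.mp h2).1 h
    have hrest_nd : (k1 ++ k2).Nodup := by
      have := hnd
      rw [List.nodup_append] at this ⊢
      obtain ⟨h1, h2, h3⟩ := this
      exact ⟨h1, (List.nodup_cons.mp h2).2, fun a ha b hb => h3 a ha b (by simp [hb])⟩
    have hperm : (k1 ++ x :: k2).Perm (x :: (k1 ++ k2)) := List.perm_middle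
    have hrest_congr : (k1 ++ k2).flatMap f' = (k1 ++ k2).flatMap f := by
      apply List.flatMap_congr
      intro a ha
      have hax : ¬ x = a := fun h => hxrest (h ▸ ha)
      rw [hf', hf]
      simp only [pvOcc_snoc, if_neg hax, List.append_nil]
    have hcond : ((pvOcc t x).length < m) ↔ ((t.count x : Int) < n) := by
      rw [pvOcc_length]
      omega
    have hfx : f' x = f x ++ (if (t.count x : Int) < n then [(t.length : Int)] else []) := by
      rw [hf', hf]
      simp only [pvOcc_snoc, if_true, pvTake_snoc]
      congr 1
      rcases lt_or_ge ((t.count x : Int)) n with h | h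
      · rw [if_pos (hcond.mpr h), if_pos h]
      · rw [if_neg (fun hh => absurd (hcond.mp hh) (not_lt.mpr h)),
            if_neg (not_lt.mpr h)]
    set e := if (t.count x : Int) < n then [(t.length : Int)] else [] with he
    have step1 : ((k1 ++ x :: k2).flatMap f').Perm (f x ++ e ++ (k1 ++ k2).flatMap f) := by
      refine (List.Perm.flatMap_right f' hperm).trans ?_
      rw [List.flatMap_cons, hrest_congr, hfx]
    have hIH : ((x :: (k1 ++ k2)).flatMap f).Perm (pvSel t n) := by
      by_cases hxt : x ∈ t
      · refine (List.Perm.flatMap_right f hperm.symm).trans ?_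
        apply ih _ hnd
        intro l
        rw [hmem, List.mem_append, List.mem_singleton]
        constructor
        · rintro (h | rfl)
          · exact h
          · exact hxt
        · exact Or.inl
      · rw [List.flatMap_cons]
        have hfxnil : f x = [] := by
          rw [hf]
          simp [pvOcc_eq_nil hxt]
        rw [hfxnil, List.nil_append]
        apply ih _ hrest_nd
        intro l
        constructor
        · intro hl
          have hlks : l ∈ k1 ++ x :: k2 := by
            rw [List.mem_append] at hl ⊢
            rcases hl with h | h
            · exact Or.inl h
            · exact Or.inr (List.mem_cons_of_mem _ h)
          have := (hmem l).mp hlks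
          rw [List.mem_append, List.mem_singleton] at this
          rcases this with h | rfl
          · exact h
          · exact absurd hl hxrest
        · intro hl
          have hlks := (hmem l).mpr (by rw [List.mem_append]; exact Or.inl hl)
          rw [List.mem_append, List.mem_cons] at hlks
          rw [List.mem_append]
          rcases hlks with h | h | h
          · exact Or.inl h
          · exact absurd (h ▸ hl) hxt
          · exact Or.inr h
    refine step1.trans ?_
    rw [pvSel_snoc, ← he]
    have p1 : (f x ++ e ++ (k1 ++ k2).flatMap f).Perm (f x ++ ((k1 ++ k2).flatMap f ++ e)) := by
      rw [List.append_assoc]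
      exact List.Perm.append_left _ List.perm_append_comm
    have p2 : (f x ++ ((k1 ++ k2).flatMap f ++ e)).Perm (pvSel t n ++ e) := by
      rw [← List.append_assoc]
      apply List.Perm.append_right
      have hcons : (f x ++ (k1 ++ k2).flatMap f) = (x :: (k1 ++ k2)).flatMap f :=
        (List.flatMap_cons ..).symm
      rw [hcons]
      exact hIH
    exact p1.trans p2

lemma pvA_eq_sel (text : List String) (n : Int) :
    get_samples_per_class text n = pvSel text n := by
  exact (pvFoldA_inv n text).2

lemma pvAlt_eq_sel (text : List String) (n : Int) :
    get_samples_per_class_alt text n = pvSel text n := by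
  obtain ⟨ks, hitems, hnd, hmem⟩ := pvFoldG_items text
  show PySem.List.sorted
      ((((PySem.List.enumerate text 0).foldl pvStepG ⟨[]⟩).values).foldl
        (fun (acc : List Int) indices =>
          acc ++ PySem.List.slice indices none (some (max 0 n))) [])
      (fun x => x) = pvSel text n
  have hvalues : ((PySem.List.enumerate text 0).foldl pvStepG ⟨[]⟩).values
      = ks.map (fun l => pvOcc text l) := by
    rw [PySem.Dict.values, hitems, List.map_map]
    rfl
  rw [PySem.List.foldl_append_eq_flatMap
        (fun indices => PySem.List.slice indices none (some (max 0 n))), List.nil_append,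
      hvalues, List.flatMap_map]
  have hslice : (fun a => PySem.List.slice (pvOcc text a) none (some (max 0 n)))
      = fun l => (pvOcc text l).take (max 0 n).toNat := by
    funext l
    exact PySem.List.slice_to (pvOcc text l) (le_max_left 0 n)
  rw [hslice]
  exact PySem.List.sorted_eq_of_perm_of_pairwise_lt _ _ _
    ((pvPerm_flatMap n text ks hnd hmem).symm) (pvSel_pairwise text n)

-- ===== VERDICT (by name: the statement is the Claim_ definition above) =====
theorem get_samples_per_class_spec : Claim_equal_get_samples_per_class := by
  intro text n _
  unfold Spec_get_samples_per_class
  rw [pvA_eq_sel, pvAlt_eq_sel]
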